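-- pv_equiv track=rewrite | github.com/GabrielGarayalde/RL_TOPOPT_DQN | Methods_RL.py | ActiveNodes
-- ===== SOURCE A (Python) =====
-- def ActiveNodes(Elements, Nodes):
--     #important to copy or else the deletion would occur to both the objects
--     active_nodes = []
--     Nodes = list(range(len(Nodes)))
--     for element in Elements:
--         active_nodes.append(element[0])
--         active_nodes.append(element[1])
--
--     active_nodes = sorted(set(active_nodes))
--
--     inactive_nodes = [x for x in Nodes if x not in active_nodes]
--
--     return active_nodes, inactive_nodes
-- ===== SOURCE B (Python) =====
-- def ActiveNodes(Elements, Nodes):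
--     s = set()
--     for element in Elements:
--         s.add(element[0])
--         s.add(element[1])
--     active_nodes = sorted(s)
--     inactive_nodes = []
--     j = 0
--     for i in range(len(Nodes)):
--         while j < len(active_nodes) and active_nodes[j] < i:
--             j += 1
--         if j < len(active_nodes) and active_nodes[j] == i:
--             j += 1
--         else:
--             inactive_nodes.append(i)
--     return active_nodes, inactive_nodes
-- ===== Notes on version B (the rewrite author's own statement) =====
-- stated objective: faster
-- what changed: B builds the active set by direct set.add calls and computes the inactive nodes with a single two-pointer merge over the sorted active list instead of A's per-node 'x not in active_nodes' list scan.
import Mathlib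
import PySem

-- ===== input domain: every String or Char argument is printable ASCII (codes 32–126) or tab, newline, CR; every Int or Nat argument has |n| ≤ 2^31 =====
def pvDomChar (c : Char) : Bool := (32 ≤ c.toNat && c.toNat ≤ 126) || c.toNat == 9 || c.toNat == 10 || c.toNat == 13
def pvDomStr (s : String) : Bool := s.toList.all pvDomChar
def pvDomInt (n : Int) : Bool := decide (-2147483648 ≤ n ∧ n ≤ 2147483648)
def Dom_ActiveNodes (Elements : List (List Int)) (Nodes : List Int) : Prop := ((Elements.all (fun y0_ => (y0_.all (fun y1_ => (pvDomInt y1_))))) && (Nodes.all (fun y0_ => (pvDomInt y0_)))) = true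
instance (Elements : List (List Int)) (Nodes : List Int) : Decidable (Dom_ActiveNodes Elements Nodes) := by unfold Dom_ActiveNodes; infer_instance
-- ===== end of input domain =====

-- B computes the inactive nodes by a single two-pointer merge over the sorted active list
-- instead of A's per-node membership scan.


-- ===== PORT A =====
def ActiveNodes (Elements : List (List Int)) (Nodes : List Int) : List Int × List Int :=
  -- Nodes = list(range(len(Nodes)))
  let nodes := PySem.List.pyRange 0 (PySem.List.len Nodes) 1
  -- the loop appending element[0] and element[1]  (element[i] total under Pre_)
  let raw := Elements.foldl
    (fun acc element => acc ++ [PySem.List.pyGetD element 0 0] ++ [PySem.List.pyGetD element 1 0]) []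
  -- active_nodes = sorted(set(active_nodes))
  let active := PySem.List.sorted (PySem.Set.ofList raw) (fun x => x) false
  -- inactive_nodes = [x for x in Nodes if x not in active_nodes]
  let inactive := nodes.filter (fun x => decide (x ∉ active))
  (active, inactive)

-- ===== PORT B =====
-- while j < len(active_nodes) and active_nodes[j] < i: j += 1
def pvSkipLt (active : List Int) (i : Int) (j : Nat) : Nat :=
  if h : j < active.length then
    if active[j] < i then pvSkipLt active i (j + 1) else j
  else j
termination_by active.length - j

-- B's 'for i in range(len(Nodes))' loop, over the remaining i's, with state (j, acc)
def pvMergeLoop (active : List Int) (is : List Int) (j : Nat) (acc : List Int) : List Int :=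
  match is with
  | [] => acc
  | i :: rest =>
    let j' := pvSkipLt active i j
    if h : j' < active.length then
      if active[j'] = i then pvMergeLoop active rest (j' + 1) acc
      else pvMergeLoop active rest j' (acc ++ [i])
    else pvMergeLoop active rest j' (acc ++ [i])

def ActiveNodes_alt (Elements : List (List Int)) (Nodes : List Int) : List Int × List Int :=
  -- s = set(); for element in Elements: s.add(element[0]); s.add(element[1])
  let s := Elements.foldl
    (fun s element =>
      PySem.Set.add (PySem.Set.add s (PySem.List.pyGetD element 0 0)) (PySem.List.pyGetD element 1 0))
    PySem.Set.empty
  let active := PySem.List.sorted s (fun x => x) false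
  let inactive := pvMergeLoop active (PySem.List.pyRange 0 (PySem.List.len Nodes) 1) 0 []
  (active, inactive)

-- ===== PRECONDITION & SPEC =====
-- Pre_ excludes exactly the inputs where A raises IndexError: an element with fewer than 2 entries.
def Pre_ActiveNodes (Elements : List (List Int)) (Nodes : List Int) : Prop :=
  ∀ e ∈ Elements, 2 ≤ e.length
instance (Elements : List (List Int)) (Nodes : List Int) : Decidable (Pre_ActiveNodes Elements Nodes) := by unfold Pre_ActiveNodes; infer_instance
def pvWitness_ActiveNodes : List (List Int) × List Int := ([[0, 2], [2, 3]], [5, 5, 5, 5])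

def Spec_ActiveNodes (Elements : List (List Int)) (Nodes : List Int) (out : List Int × List Int) : Prop := out = ActiveNodes_alt Elements Nodes
instance (Elements : List (List Int)) (Nodes : List Int) (out : List Int × List Int) : Decidable (Spec_ActiveNodes Elements Nodes out) := by unfold Spec_ActiveNodes; infer_instance

-- ===== CLAIM (what is proved, stated in full; the proofs are below) =====
def Claim_equal_ActiveNodes : Prop := ∀ (Elements : List (List Int)) (Nodes : List Int), Dom_ActiveNodes Elements Nodes → Pre_ActiveNodes Elements Nodes → Spec_ActiveNodes Elements Nodes (ActiveNodes Elements Nodes)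

-- ===== LEMMAS AND PROOFS =====

-- Building the set by two adds per element equals set() of A's appended raw list.
theorem pv_set_build (Elements : List (List Int)) (r : List Int) (s : PySem.Set Int) :
    (Elements.foldl
      (fun acc element => acc ++ [PySem.List.pyGetD element 0 0] ++ [PySem.List.pyGetD element 1 0]) r).foldl
      PySem.Set.add s
    = Elements.foldl
        (fun s element =>
          PySem.Set.add (PySem.Set.add s (PySem.List.pyGetD element 0 0)) (PySem.List.pyGetD element 1 0))
        (r.foldl PySem.Set.add s) := by
  induction Elements generalizing r s with
  | nil => rfl
  | cons e t ih =>
    simp only [List.foldl_cons, ih, List.foldl_append, List.foldl_nil]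

-- the while loop: j ≤ j', everything at indices [j, j') is < i, and active[j'] (if any) is not < i
theorem pvSkipLt_spec (active : List Int) (i : Int) (j : Nat) :
    j ≤ pvSkipLt active i j ∧ pvSkipLt active i j ≤ max j active.length ∧
    (∀ k (hk : k < active.length), j ≤ k → k < pvSkipLt active i j → active[k] < i) ∧
    (∀ h : pvSkipLt active i j < active.length, ¬ active[pvSkipLt active i j] < i) := by
  have main : ∀ (m j : Nat), active.length - j ≤ m →
      j ≤ pvSkipLt active i j ∧ pvSkipLt active i j ≤ max j active.length ∧
      (∀ k (hk : k < active.length), j ≤ k → k < pvSkipLt active i j → active[k] < i) ∧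
      (∀ h : pvSkipLt active i j < active.length, ¬ active[pvSkipLt active i j] < i) := by
    intro m
    induction m with
    | zero =>
      intro j hm
      have h : ¬ j < active.length := by omega
      rw [pvSkipLt, dif_neg h]
      exact ⟨le_refl _, by omega, by omega, fun hlt => absurd hlt h⟩
    | succ m ih =>
      intro j hm
      by_cases h : j < active.length
      · by_cases hlt : active[j] < i
        · rw [pvSkipLt, dif_pos h, if_pos hlt]
          obtain ⟨h1, h2, h3, h4⟩ := ih (j + 1) (by omega)
          refine ⟨by omega, by omega, ?_, h4⟩
          intro k hk hjk hk2
          rcases Nat.eq_or_lt_of_le hjk with rfl | h'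
          · exact hlt
          · exact h3 k hk h' hk2
        · rw [pvSkipLt, dif_pos h, if_neg hlt]
          exact ⟨le_refl _, by omega, by omega, fun _ => hlt⟩
      · rw [pvSkipLt, dif_neg h]
        exact ⟨le_refl _, by omega, by omega, fun hlt => absurd hlt h⟩
  exact main (active.length - j) j (le_refl _)

-- The merge loop equals the membership filter: active and is strictly increasing, and
-- everything in active before index j smaller than every remaining i.
theorem pvMergeLoop_eq (active : List Int) (ha : active.Pairwise (· < ·)) :
    ∀ (is : List Int), is.Pairwise (· < ·) → ∀ (j : Nat) (acc : List Int),
      (∀ k (hk : k < active.length), k < j → ∀ x ∈ is, active[k] < x) →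
      pvMergeLoop active is j acc = acc ++ is.filter (fun x => decide (x ∉ active)) := by
  intro is
  induction is with
  | nil => intro _ j acc _; simp [pvMergeLoop]
  | cons i rest ih =>
    intro his j acc hj
    obtain ⟨hfirst, hrest⟩ := List.pairwise_cons.mp his
    obtain ⟨h1, h2, h3, h4⟩ := pvSkipLt_spec active i j
    set j' := pvSkipLt active i j with hj'
    have hpa := List.pairwise_iff_getElem.mp ha
    have hbefore : ∀ k (hk : k < active.length), k < j' → active[k] < i := by
      intro k hk hkj'
      by_cases hkj : k < j
      · exact hj k hk hkj i (List.mem_cons_self ..)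
      · exact h3 k hk (by omega) hkj'
    have mem_iff : i ∈ active ↔ ∃ h : j' < active.length, active[j'] = i := by
      constructor
      · intro hmem
        obtain ⟨k, hk, hki⟩ := List.getElem_of_mem hmem
        have hk1 : ¬ k < j' := fun hlt => absurd hki (by have := hbefore k hk hlt; omega)
        have hk2 : j' < active.length := by omega
        refine ⟨hk2, ?_⟩
        rcases Nat.eq_or_lt_of_le (by omega : j' ≤ k) with rfl | hlt
        · exact hki
        · exact absurd (hki ▸ hpa j' k (by omega) hk hlt) (h4 hk2)
      · rintro ⟨h, hi⟩; exact hi ▸ List.getElem_mem h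
    by_cases hin : j' < active.length
    · by_cases heq : active[j'] = i
      · have himem : i ∈ active := mem_iff.mpr ⟨hin, heq⟩
        rw [pvMergeLoop]
        simp only [← hj', dif_pos hin, if_pos heq]
        rw [ih hrest (j' + 1) acc ?_]
        · simp [himem]
        · intro k hk hkj x hx
          have hix : i < x := hfirst x hx
          rcases Nat.eq_or_lt_of_le (by omega : k ≤ j') with rfl | hlt
          · omega
          · have := hbefore k hk hlt; omega
      · have himem : i ∉ active := fun hm => heq (mem_iff.mp hm).2
        rw [pvMergeLoop]
        simp only [← hj', dif_pos hin, if_neg heq]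
        rw [ih hrest j' (acc ++ [i]) ?_]
        · simp [himem]
        · intro k hk hkj x hx
          have := hbefore k hk hkj; have := hfirst x hx; omega
    · have himem : i ∉ active := fun hm => hin (mem_iff.mp hm).1
      rw [pvMergeLoop]
      simp only [← hj', dif_neg hin]
      rw [ih hrest j' (acc ++ [i]) ?_]
      · simp [himem]
      · intro k hk hkj x hx
        have := hbefore k hk hkj; have := hfirst x hx; omega

-- ===== VERDICT (by name: the statement is the Claim_ definition above) =====
theorem ActiveNodes_spec : Claim_equal_ActiveNodes := by
  intro Elements Nodes _ _
  unfold Spec_ActiveNodes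
  simp only [ActiveNodes, ActiveNodes_alt]
  have hset : Elements.foldl
      (fun s element =>
        PySem.Set.add (PySem.Set.add s (PySem.List.pyGetD element 0 0)) (PySem.List.pyGetD element 1 0))
      PySem.Set.empty
      = PySem.Set.ofList (Elements.foldl
          (fun acc element => acc ++ [PySem.List.pyGetD element 0 0] ++ [PySem.List.pyGetD element 1 0]) []) := by
    rw [PySem.Set.ofList_eq_foldl]
    exact (pv_set_build Elements [] PySem.Set.empty).symm
  rw [hset]
  rw [pvMergeLoop_eq _ (PySem.List.sorted_ofList_pairwise_lt _) _
        (PySem.List.pairwise_lt_pyRange_one 0 (PySem.List.len Nodes)) 0 []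
        (by intro k hk h0; omega)]
  rw [List.nil_append]
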